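-- pv_equiv track=rewrite | github.com/jsatyler93/codemap | python/idl_flowchart.py | compute_indent_scale
-- ===== SOURCE A (Python) =====
-- from typing import Any, Dict, List, Optional, Tuple
--
-- def compute_indent_scale(cf_nodes: List[Dict[str, Any]]) -> Tuple[int, int]:
--     positive = sorted({int(node.get("indentColumn", 0)) for node in cf_nodes if int(node.get("indentColumn", 0)) > 0})
--     if not positive:
--         return 0, 2
--     base = positive[0]
--     deltas = sorted({value - base for value in positive if value > base})
--     step = deltas[0] if deltas else 2
--     return base, max(1, step)
-- ===== SOURCE B (Python) =====
-- from typing import Any, Dict, List, Tuple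
--
-- def compute_indent_scale(cf_nodes: List[Dict[str, Any]]) -> Tuple[int, int]:
--     m1 = None  # smallest positive indent seen so far
--     m2 = None  # second-smallest distinct positive indent seen so far
--     for node in cf_nodes:
--         v = int(node.get("indentColumn", 0))
--         if v <= 0:
--             continue
--         if m1 is None:
--             m1 = v
--         elif v < m1:
--             m1, m2 = v, m1
--         elif v > m1 and (m2 is None or v < m2):
--             m2 = v
--     if m1 is None:
--         return 0, 2
--     step = m2 - m1 if m2 is not None else 2
--     return m1, max(1, step)
-- ===== Notes on version B (the rewrite author's own statement) =====
-- stated objective: alternative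
-- what changed: Replaces A's build-a-set/sort/index passes with a single streaming pass that maintains the two smallest distinct positive indent columns in an accumulator; base is the smallest and step is their difference, no intermediate collections.
import Mathlib
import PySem

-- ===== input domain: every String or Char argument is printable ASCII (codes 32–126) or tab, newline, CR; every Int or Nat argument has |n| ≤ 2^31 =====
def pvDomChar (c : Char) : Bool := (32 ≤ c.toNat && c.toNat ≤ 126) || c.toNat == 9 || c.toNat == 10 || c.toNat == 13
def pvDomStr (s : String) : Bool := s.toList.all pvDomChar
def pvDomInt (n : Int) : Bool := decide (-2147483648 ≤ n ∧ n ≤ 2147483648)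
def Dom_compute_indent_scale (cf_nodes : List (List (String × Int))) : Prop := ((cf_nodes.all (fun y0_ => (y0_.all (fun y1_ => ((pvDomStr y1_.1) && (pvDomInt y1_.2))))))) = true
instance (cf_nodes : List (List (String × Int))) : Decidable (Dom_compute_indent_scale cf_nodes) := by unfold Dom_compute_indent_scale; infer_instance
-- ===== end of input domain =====

-- B replaces A's build-a-set/sort/index strategy by ONE streaming pass that keeps the two
-- smallest distinct positive indent columns in an accumulator (alternative decomposition).

-- ===== PORT A =====
-- node.get("indentColumn", 0): first-match association-list lookup with default 0
def pvIndentOf (node : List (String × Int)) : Int :=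
  (PySem.Dict.mk node).getD "indentColumn" 0

def compute_indent_scale (cf_nodes : List (List (String × Int))) : Int × Int :=
  -- positive = sorted({int(node.get("indentColumn",0)) for node in cf_nodes if … > 0})
  let positive := PySem.List.sorted
      (PySem.Set.ofList ((cf_nodes.map pvIndentOf).filter (fun v => decide (0 < v))))
      (fun x => x) false
  match positive with
  | [] => (0, 2)
  | base :: _ =>
    let deltas := PySem.List.sorted
        (PySem.Set.ofList ((positive.filter (fun v => decide (base < v))).map (fun v => v - base)))
        (fun x => x) false
    let step := match deltas with | [] => 2 | d :: _ => d
    (base, max 1 step)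

-- ===== PORT B =====
-- one loop iteration of Source B: update (m1, m2) = (smallest, second-smallest distinct positive)
def pvStep (s : Option Int × Option Int) (v : Int) : Option Int × Option Int :=
  if v ≤ 0 then s
  else
    match s with
    | (none, m2) => (some v, m2)
    | (some m1, m2) =>
      if v < m1 then (some v, some m1)
      else if m1 < v then
        (match m2 with
         | none => (some m1, some v)
         | some m => if v < m then (some m1, some v) else (some m1, some m))
      else (some m1, m2)

def compute_indent_scale_alt (cf_nodes : List (List (String × Int))) : Int × Int :=
  let r := cf_nodes.foldl (fun s node => pvStep s (pvIndentOf node)) (none, none)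
  match r.1 with
  | none => (0, 2)
  | some m1 =>
    let step := match r.2 with | none => 2 | some m2 => m2 - m1
    (m1, max 1 step)

-- ===== PRECONDITION & SPEC =====
def Spec_compute_indent_scale (cf_nodes : List (List (String × Int))) (out : Int × Int) : Prop := out = compute_indent_scale_alt cf_nodes
instance (cf_nodes : List (List (String × Int))) (out : Int × Int) : Decidable (Spec_compute_indent_scale cf_nodes out) := by unfold Spec_compute_indent_scale; infer_instance

-- ===== CLAIM (what is proved, stated in full; the proofs are below) =====
def Claim_equal_compute_indent_scale : Prop := ∀ (cf_nodes : List (List (String × Int))), Dom_compute_indent_scale cf_nodes → Spec_compute_indent_scale cf_nodes (compute_indent_scale cf_nodes)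

-- ===== LEMMAS AND PROOFS =====

-- o is none iff L is empty, else the minimum of L
def IsMinO (o : Option Int) (L : List Int) : Prop :=
  match o with
  | none => L = []
  | some m => m ∈ L ∧ ∀ x ∈ L, m ≤ x

-- the invariant of Source B's loop, P being the positive values consumed so far
def LoopInv (s : Option Int × Option Int) (P : List Int) : Prop :=
  IsMinO s.1 P ∧ (∀ b, s.1 = some b → IsMinO s.2 (P.filter (fun x => decide (b < x)))) ∧
  (s.1 = none → s.2 = none)

theorem pvStep_inv (s : Option Int × Option Int) (P : List Int) (v : Int)
    (h : LoopInv s P) : LoopInv (pvStep s v) (P ++ if 0 < v then [v] else []) := by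
  obtain ⟨h1, h2, h3⟩ := h
  by_cases hv : v ≤ 0
  · have : ¬ 0 < v := by omega
    simp [pvStep, hv, this]
    exact ⟨h1, h2, h3⟩
  · have hvpos : 0 < v := by omega
    obtain ⟨o1, o2⟩ := s
    cases o1 with
    | none =>
      have hP : P = [] := h1
      have ho2 : o2 = none := h3 rfl
      subst hP ho2
      simp [pvStep, hv, hvpos, LoopInv, IsMinO]
    | some m1 =>
      obtain ⟨hm1mem, hm1min⟩ := h1
      by_cases hlt : v < m1
      · -- new min v, old min m1 becomes second
        simp only [pvStep, if_neg hv, if_pos hlt, if_pos hvpos]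
        refine ⟨⟨by simp, ?_⟩, ?_, by simp⟩
        · intro x hx
          rcases List.mem_append.mp hx with hx | hx
          · have := hm1min x hx; omega
          · simp at hx; omega
        · intro b hb
          simp only [Option.some.injEq] at hb
          subst hb
          refine ⟨?_, ?_⟩
          · rw [List.mem_filter]
            exact ⟨List.mem_append.mpr (Or.inl hm1mem), by simp; omega⟩
          · intro x hx
            rw [List.mem_filter] at hx
            rcases List.mem_append.mp hx.1 with hx' | hx'
            · exact hm1min x hx'
            · simp at hx'; have := hx.2; simp at this; omega
      · by_cases hgt : m1 < v
        · -- candidate for second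
          have hfil : (P ++ [v]).filter (fun x => decide (m1 < x))
              = P.filter (fun x => decide (m1 < x)) ++ [v] := by
            rw [List.filter_append]; simp [hgt]
          cases o2 with
          | none =>
            have hPf : P.filter (fun x => decide (m1 < x)) = [] := h2 m1 rfl
            simp only [pvStep, if_neg hv, if_neg (by omega : ¬ v < m1), if_pos hgt, if_pos hvpos]
            refine ⟨⟨List.mem_append.mpr (Or.inl hm1mem), ?_⟩, ?_, by simp⟩
            · intro x hx
              rcases List.mem_append.mp hx with hx | hx
              · exact hm1min x hx
              · simp at hx; omega
            · intro b hb
              simp only [Option.some.injEq] at hb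
              subst hb
              rw [hfil, hPf]
              exact ⟨by simp, by intro x hx; simp at hx; omega⟩
          | some m =>
            have hm := h2 m1 rfl
            obtain ⟨hmmem, hmmin⟩ := hm
            by_cases hvm : v < m
            · simp only [pvStep, if_neg hv, if_neg (by omega : ¬ v < m1), if_pos hgt, if_pos hvm,
                if_pos hvpos]
              refine ⟨⟨List.mem_append.mpr (Or.inl hm1mem), ?_⟩, ?_, by simp⟩
              · intro x hx
                rcases List.mem_append.mp hx with hx | hx
                · exact hm1min x hx
                · simp at hx; omega
              · intro b hb
                simp only [Option.some.injEq] at hb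
                subst hb
                rw [hfil]
                refine ⟨by simp, ?_⟩
                intro x hx
                rcases List.mem_append.mp hx with hx | hx
                · have := hmmin x hx; omega
                · simp at hx; omega
            · simp only [pvStep, if_neg hv, if_neg (by omega : ¬ v < m1), if_pos hgt, if_neg hvm,
                if_pos hvpos]
              refine ⟨⟨List.mem_append.mpr (Or.inl hm1mem), ?_⟩, ?_, by simp⟩
              · intro x hx
                rcases List.mem_append.mp hx with hx | hx
                · exact hm1min x hx
                · simp at hx; omega
              · intro b hb
                simp only [Option.some.injEq] at hb
                subst hb
                rw [hfil]
                refine ⟨List.mem_append.mpr (Or.inl hmmem), ?_⟩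
                intro x hx
                rcases List.mem_append.mp hx with hx | hx
                · exact hmmin x hx
                · simp at hx; omega
        · -- v = m1: nothing changes
          have hvm : v = m1 := by omega
          subst hvm
          simp only [pvStep, if_neg hv, if_neg (by omega : ¬ v < v), if_pos hvpos]
          refine ⟨⟨List.mem_append.mpr (Or.inl hm1mem), ?_⟩, ?_, by simp⟩
          · intro x hx
            rcases List.mem_append.mp hx with hx | hx
            · exact hm1min x hx
            · simp at hx; omega
          · intro b hb
            simp only [Option.some.injEq] at hb
            subst hb
            have hfil : (P ++ [v]).filter (fun x => decide (v < x))
                = P.filter (fun x => decide (v < x)) := by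
              rw [List.filter_append]; simp
            rw [hfil]
            exact h2 v rfl

theorem fold_inv (l : List Int) (s : Option Int × Option Int) (P : List Int)
    (h : LoopInv s P) : LoopInv (l.foldl pvStep s) (P ++ l.filter (fun v => decide (0 < v))) := by
  induction l generalizing s P with
  | nil => simpa using h
  | cons v t ih =>
    have step := pvStep_inv s P v h
    have := ih (pvStep s v) (P ++ if 0 < v then [v] else []) step
    rw [List.foldl_cons]
    by_cases hv : 0 < v
    · simpa [hv, List.append_assoc] using this
    · simpa [hv] using this

-- min of a nonempty list exists
theorem min?_id_ne_none (l : List Int) (h : l ≠ []) :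
    ∃ m, PySem.List.min? l (fun x => x) = some m := by
  cases l with
  | nil => exact absurd rfl h
  | cons x t => exact ⟨t.foldl min x, PySem.List.min?_id_cons ..⟩

-- IsMinO determines min?
theorem IsMinO_unique (o o' : Option Int) (L L' : List Int)
    (hmem : ∀ x, x ∈ L ↔ x ∈ L') (h : IsMinO o L) (h' : IsMinO o' L') : o = o' := by
  cases o with
  | none =>
    cases o' with
    | none => rfl
    | some m' =>
      exfalso
      have hL : L = [] := h
      have : m' ∈ L := (hmem m').mpr h'.1
      rw [hL] at this; simp at this
  | some m =>
    cases o' with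
    | none =>
      exfalso
      have hL' : L' = [] := h'
      have : m ∈ L' := (hmem m).mp h.1
      rw [hL'] at this; simp at this
    | some m' =>
      have h1 : m ≤ m' := h.2 m' ((hmem m').mpr h'.1)
      have h2 : m' ≤ m := h'.2 m ((hmem m).mp h.1)
      simp; omega

-- sorted(set(l)) is b :: t with b = min(l), the same members as l, tail strictly above b
theorem head_sorted_ofList_min (l : List Int) (hne : l ≠ []) :
    ∃ b t, PySem.List.sorted (PySem.Set.ofList l) (fun x => x) false = b :: t ∧
      IsMinO (some b) l ∧
      (∀ x, x ∈ (b :: t) ↔ x ∈ l) ∧ (∀ x ∈ t, b < x) := by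
  have hmemS : ∀ x, x ∈ PySem.List.sorted (PySem.Set.ofList l) (fun x => x) false ↔ x ∈ l := by
    intro x
    rw [PySem.List.mem_sorted, PySem.Set.mem_ofList]
  have hpw := PySem.List.sorted_ofList_pairwise_lt (xs := l)
  obtain ⟨m, hm⟩ : ∃ m, PySem.List.min? l (fun x => x) = some m := min?_id_ne_none l hne
  have hmmem := PySem.List.min?_mem hm
  have hmle := PySem.List.min?_isMin hm
  cases hSeq : PySem.List.sorted (PySem.Set.ofList l) (fun x => x) false with
  | nil =>
      exact absurd ((hmemS m).mpr hmmem) (by rw [hSeq]; simp)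
  | cons b t =>
      rw [hSeq] at hmemS hpw
      have hlt : ∀ x ∈ t, b < x := (List.pairwise_cons.mp hpw).1
      have hbl : b ∈ l := (hmemS b).mp (List.mem_cons_self ..)
      have hbmin : ∀ x ∈ l, b ≤ x := by
        intro x hx
        rcases List.mem_cons.mp ((hmemS x).mpr hx) with h | h
        · omega
        · exact le_of_lt (hlt x h)
      exact ⟨b, t, rfl, ⟨hbl, hbmin⟩, hmemS, hlt⟩

theorem compute_indent_scale_spec : Claim_equal_compute_indent_scale := by
  intro cf_nodes _
  unfold Spec_compute_indent_scale
  simp only [compute_indent_scale, compute_indent_scale_alt]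
  set L := (cf_nodes.map pvIndentOf).filter (fun v => decide (0 < v)) with hLdef
  have hfold : cf_nodes.foldl (fun s node => pvStep s (pvIndentOf node)) (none, none)
      = (cf_nodes.map pvIndentOf).foldl pvStep (none, none) := by
    rw [List.foldl_map]
  have hinv : LoopInv ((cf_nodes.map pvIndentOf).foldl pvStep (none, none)) L := by
    have := fold_inv (cf_nodes.map pvIndentOf) (none, none) []
      ⟨rfl, by intro b hb; simp at hb, fun _ => rfl⟩
    simpa [hLdef] using this
  rw [hfold]
  set r := (cf_nodes.map pvIndentOf).foldl pvStep (none, none) with hr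
  obtain ⟨hi1, hi2, hi3⟩ := hinv
  by_cases hL : L = []
  · have hr1 : r.1 = none := by
      cases ho : r.1 with
      | none => rfl
      | some m =>
        exfalso
        rw [ho] at hi1
        have := hi1.1
        rw [hL] at this; simp at this
    rw [hL, hr1]
    rfl
  · obtain ⟨b, t, hS, hbmin, hmem, hlt⟩ := head_sorted_ofList_min L hL
    have hr1 : r.1 = some b := IsMinO_unique r.1 (some b) L L (fun _ => Iff.rfl) hi1 hbmin
    rw [hS, hr1]
    simp only []
    refine Prod.ext rfl ?_
    have hM := hi2 b hr1
    set M := L.filter (fun x => decide (b < x)) with hMdef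
    set MA := ((b :: t).filter (fun v => decide (b < v))).map (fun v => v - b) with hMA
    have hmemMA : ∀ x, x ∈ MA ↔ ∃ v ∈ M, x = v - b := by
      intro x
      rw [hMA, hMdef]
      constructor
      · intro hx
        obtain ⟨v, hv, rfl⟩ := List.mem_map.mp hx
        obtain ⟨hv1, hv2⟩ := List.mem_filter.mp hv
        exact ⟨v, List.mem_filter.mpr ⟨(hmem v).mp hv1, hv2⟩, rfl⟩
      · rintro ⟨v, hv, rfl⟩
        obtain ⟨hv1, hv2⟩ := List.mem_filter.mp hv
        exact List.mem_map.mpr ⟨v, List.mem_filter.mpr ⟨(hmem v).mpr hv1, hv2⟩, rfl⟩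
    cases ho2 : r.2 with
    | none =>
      have hMe : M = [] := by rw [ho2] at hM; exact hM
      have hMAe : MA = [] := by
        rcases List.eq_nil_or_concat MA with h | ⟨ys, y, hy⟩
        · exact h
        · exfalso
          obtain ⟨v, hv, _⟩ := (hmemMA y).mp (by rw [hy]; simp)
          rw [hMe] at hv; simp at hv
      rw [hMAe]
      simp [PySem.List.sorted, PySem.Set.ofList]
    | some m2 =>
      rw [ho2] at hM
      have hMne : MA ≠ [] := by
        intro h
        have : m2 - b ∈ MA := (hmemMA (m2 - b)).mpr ⟨m2, hM.1, rfl⟩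
        rw [h] at this; simp at this
      obtain ⟨d, t', hS', hdmin, hmem', _⟩ := head_sorted_ofList_min MA hMne
      have hd : d = m2 - b := by
        have h2 : IsMinO (some (m2 - b)) MA := by
          refine ⟨(hmemMA (m2 - b)).mpr ⟨m2, hM.1, rfl⟩, ?_⟩
          intro x hx
          obtain ⟨v, hv, rfl⟩ := (hmemMA x).mp hx
          have := hM.2 v hv
          omega
        have := IsMinO_unique (some d) (some (m2 - b)) MA MA (fun _ => Iff.rfl) hdmin h2
        simpa using this
      rw [hS', hd]
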